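-- pv_equiv track=rewrite | github.com/Nana2929/dialogue-absa | dataset/diaasq/full_dialogue_dataset.py | __get_sentence_boundaries
-- ===== SOURCE A (Python) =====
-- def __get_sentence_boundaries(raw_sentences) -> list[tuple[int, int]]:
--     """
--     Parameters
--     ----------
--     raw_sentences : _type_
--         The DiaASQ dataset's original key 'sentences'
--     Returns
--     -------
--     list(tuple(int, int))
--         A list of start and end indices of each sentence when sentences are
--         concatenated as " ".join(raw_sentences)
--     """
--     sentence_indices = []
--     start_index = 0
--     for sent in raw_sentences:
--         end_index = start_index + len(sent.split())
--         sentence_indices.append((start_index, end_index))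
--         start_index = end_index
--     return sentence_indices
-- ===== SOURCE B (Python) =====
-- def __get_sentence_boundaries(raw_sentences) -> list[tuple[int, int]]:
--     # Divide and conquer: boundaries of each half computed independently,
--     # then the right half's boundaries are shifted by the left half's last end.
--     if not raw_sentences:
--         return []
--     if len(raw_sentences) == 1:
--         return [(0, len(raw_sentences[0].split()))]
--     mid = len(raw_sentences) // 2
--     left = __get_sentence_boundaries(raw_sentences[:mid])
--     right = __get_sentence_boundaries(raw_sentences[mid:])
--     off = left[-1][1]
--     return left + [(s + off, e + off) for (s, e) in right]
-- ===== Notes on version B (the rewrite author's own statement) =====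
-- stated objective: alternative
-- what changed: Replaces the forward loop threading a running start index with divide and conquer: boundaries of each half are computed independently and the right half is shifted by the left half's last end index.
import Mathlib
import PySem

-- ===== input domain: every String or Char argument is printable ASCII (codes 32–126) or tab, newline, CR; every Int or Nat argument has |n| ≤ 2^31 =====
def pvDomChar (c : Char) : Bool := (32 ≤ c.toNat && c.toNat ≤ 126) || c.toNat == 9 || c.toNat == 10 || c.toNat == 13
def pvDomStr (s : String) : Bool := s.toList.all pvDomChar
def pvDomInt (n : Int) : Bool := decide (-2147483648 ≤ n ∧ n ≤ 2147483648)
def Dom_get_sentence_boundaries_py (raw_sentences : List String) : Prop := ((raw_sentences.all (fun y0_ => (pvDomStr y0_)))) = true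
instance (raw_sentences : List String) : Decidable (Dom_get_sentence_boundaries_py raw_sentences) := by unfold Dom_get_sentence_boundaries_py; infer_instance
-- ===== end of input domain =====

/-
B replaces A's forward loop threading a running start index with divide and
conquer: boundaries of each half computed independently, right half shifted by
the left half's last end index; same result, different algorithm.
-/


-- ===== PORT A =====
-- A's for-loop over the sentences with the running start index, as structural recursion
def pvALoop (start : Int) : List String → List (Int × Int)
  | [] => []
  | sent :: rest =>
      let end_index := start + ((PySem.Str.split₀ sent).length : Int)
      (start, end_index) :: pvALoop end_index rest

def get_sentence_boundaries_py (raw_sentences : List String) : List (Int × Int) :=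
  pvALoop 0 raw_sentences

-- ===== PORT B =====
-- Source B's divide-and-conquer recursion; xs[:mid]/xs[mid:] with 0 ≤ mid ≤ len are take/drop
def pvDC : List String → List (Int × Int)
  | [] => []
  | [s] => [(0, ((PySem.Str.split₀ s).length : Int))]
  | x :: y :: rest =>
      let mid := (x :: y :: rest).length / 2
      let left := pvDC ((x :: y :: rest).take mid)
      let right := pvDC ((x :: y :: rest).drop mid)
      let off : Int := match left.getLast? with | some p => p.2 | none => 0  -- left[-1][1]; left is nonempty
      left ++ right.map (fun p => (p.1 + off, p.2 + off))
termination_by xs => xs.length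
decreasing_by
  · simp [List.length_take]; omega
  · simp; omega

def get_sentence_boundaries_py_alt (raw_sentences : List String) : List (Int × Int) :=
  pvDC raw_sentences

-- ===== PRECONDITION & SPEC =====
def Spec_get_sentence_boundaries_py (raw_sentences : List String) (out : List (Int × Int)) : Prop := out = get_sentence_boundaries_py_alt raw_sentences
instance (raw_sentences : List String) (out : List (Int × Int)) : Decidable (Spec_get_sentence_boundaries_py raw_sentences out) := by unfold Spec_get_sentence_boundaries_py; infer_instance

-- ===== CLAIM =====
def Claim_equal_get_sentence_boundaries_py : Prop := ∀ (raw_sentences : List String), Dom_get_sentence_boundaries_py raw_sentences → Spec_get_sentence_boundaries_py raw_sentences (get_sentence_boundaries_py raw_sentences)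

-- ===== LEMMAS AND PROOFS =====
-- total word count of a list of sentences
def pvW (xs : List String) : Int := (xs.map (fun s => ((PySem.Str.split₀ s).length : Int))).sum

theorem pvW_cons (s : String) (xs : List String) :
    pvW (s :: xs) = ((PySem.Str.split₀ s).length : Int) + pvW xs := by
  simp [pvW]

-- shifting the start shifts every boundary
theorem pvALoop_shift (xs : List String) : ∀ (a b : Int),
    pvALoop (a + b) xs = (pvALoop b xs).map (fun p => (p.1 + a, p.2 + a)) := by
  induction xs with
  | nil => intro a b; simp [pvALoop]
  | cons s rest ih =>
      intro a b
      simp only [pvALoop, List.map_cons, List.cons.injEq]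
      refine ⟨by simp only [Prod.mk.injEq]; omega, ?_⟩
      rw [show a + b + ((PySem.Str.split₀ s).length : Int)
            = a + (b + ((PySem.Str.split₀ s).length : Int)) by omega]
      exact ih a _

-- the loop splits over append, the right part starting after the left's words
theorem pvALoop_append (ys zs : List String) : ∀ (c : Int),
    pvALoop c (ys ++ zs) = pvALoop c ys ++ pvALoop (c + pvW ys) zs := by
  induction ys with
  | nil => intro c; simp [pvALoop, pvW]
  | cons s rest ih =>
      intro c
      simp only [List.cons_append, pvALoop, List.cons.injEq, true_and]
      rw [ih, pvW_cons]
      congr 2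
      omega

-- the last pair's end index is c plus the total word count
theorem pvALoop_getLast (xs : List String) (hne : xs ≠ []) : ∀ (c : Int),
    ∃ s, (pvALoop c xs).getLast? = some (s, c + pvW xs) := by
  induction xs with
  | nil => exact absurd rfl hne
  | cons x rest ih =>
      intro c
      cases h : rest with
      | nil => exact ⟨c, by simp [pvALoop, pvW]⟩
      | cons y ys =>
          obtain ⟨s, hs⟩ := ih (by simp [h]) (c + ((PySem.Str.split₀ x).length : Int))
          rw [h] at hs
          refine ⟨s, ?_⟩
          simp only [pvALoop, List.getLast?_cons_cons] at hs ⊢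
          rw [show c + pvW (x :: y :: ys)
                = c + ((PySem.Str.split₀ x).length : Int) + pvW (y :: ys) by
              rw [pvW_cons]; omega]
          exact hs

-- B's divide and conquer equals A's loop
theorem pvDC_eq (xs : List String) : pvDC xs = pvALoop 0 xs := by
  induction hn : xs.length using Nat.strong_induction_on generalizing xs with
  | _ n ih =>
    match xs with
    | [] => simp [pvDC, pvALoop]
    | [s] => simp [pvDC, pvALoop]
    | x :: y :: rest =>
      rw [pvDC]
      have hlen : (x :: y :: rest).length ≥ 2 := by simp
      set l := x :: y :: rest with hl
      set mid := l.length / 2 with hmid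
      have hmid1 : 1 ≤ mid := by simp only [hmid, hl, List.length_cons]; omega
      have hmidlt : mid < l.length := by simp only [hmid, hl, List.length_cons]; omega
      have hLlen : (l.take mid).length = mid := by simp; omega
      have hDlen : (l.drop mid).length = l.length - mid := by simp
      have hL := ih (l.take mid).length (by omega) (l.take mid) rfl
      have hR := ih (l.drop mid).length (by omega) (l.drop mid) rfl
      rw [hL, hR]
      have htake_ne : l.take mid ≠ [] := by
        intro h; have := congrArg List.length h; simp [hLlen] at this; omega
      obtain ⟨s, hs⟩ := pvALoop_getLast (l.take mid) htake_ne 0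
      rw [hs]
      simp only
      have hsplit : pvALoop 0 l = pvALoop 0 (l.take mid) ++ pvALoop (0 + pvW (l.take mid)) (l.drop mid) := by
        conv_lhs => rw [show l = l.take mid ++ l.drop mid by simp]
        exact pvALoop_append _ _ 0
      rw [hsplit]
      congr 1
      rw [← pvALoop_shift (l.drop mid) (0 + pvW (l.take mid)) 0]
      norm_num

-- ===== VERDICT =====
theorem get_sentence_boundaries_py_spec : Claim_equal_get_sentence_boundaries_py := by
  intro raw_sentences _
  unfold Spec_get_sentence_boundaries_py get_sentence_boundaries_py get_sentence_boundaries_py_alt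
  exact (pvDC_eq raw_sentences).symm
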